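-- pv_equiv track=rewrite | github.com/DXsmiley/mathbot | mathbot/core/parse_arguments.py | break_args
-- ===== SOURCE A (Python) =====
-- def remove_whitespace(stack):
-- 	while len(stack) > 0 and stack[-1] in ' \t\n':
-- 		stack.pop()
--
-- def eat_until(stack, terminal):
-- 	string = ''
-- 	while len(stack) > 0 and stack[-1] not in terminal:
-- 		string += stack.pop()
-- 	if len(stack) > 0:
-- 		stack.pop()
-- 	return string
--
-- def break_args(args):
-- 	stack = list(args[::-1])
-- 	result = []
-- 	remove_whitespace(stack)
-- 	while len(stack) > 0:
-- 		if stack[-1] in '"\'':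
-- 			result.append(eat_until(stack, stack.pop()))
-- 		else:
-- 			result.append(eat_until(stack, ' \t\n'))
-- 		remove_whitespace(stack)
-- 	return result
-- ===== SOURCE B (Python) =====
-- def break_args(args):
-- 	result = []
-- 	state = 0  # 0 = between tokens, 1 = in unquoted token, 2 = in quoted token
-- 	buf = []
-- 	quote = ''
-- 	for c in args:
-- 		if state == 0:
-- 			if c in ' \t\n':
-- 				continue
-- 			elif c in '"\'':
-- 				quote = c
-- 				state = 2
-- 			else:
-- 				buf.append(c)
-- 				state = 1
-- 		elif state == 1:
-- 			if c in ' \t\n':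
-- 				result.append(''.join(buf))
-- 				buf = []
-- 				state = 0
-- 			else:
-- 				buf.append(c)
-- 		else:
-- 			if c == quote:
-- 				result.append(''.join(buf))
-- 				buf = []
-- 				state = 0
-- 			else:
-- 				buf.append(c)
-- 	if state != 0:
-- 		result.append(''.join(buf))
-- 	return result
-- ===== Notes on version B (the rewrite author's own statement) =====
-- stated objective: faster
-- what changed: Replaced A's reversed-stack with its three pop-driven helper loops (remove_whitespace, eat_until) by a single forward pass over the characters with an explicit three-state machine (between-tokens / unquoted / quoted) and a list-buffer token accumulator joined once per token, avoiding A's per-character string concatenation.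
import Mathlib
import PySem

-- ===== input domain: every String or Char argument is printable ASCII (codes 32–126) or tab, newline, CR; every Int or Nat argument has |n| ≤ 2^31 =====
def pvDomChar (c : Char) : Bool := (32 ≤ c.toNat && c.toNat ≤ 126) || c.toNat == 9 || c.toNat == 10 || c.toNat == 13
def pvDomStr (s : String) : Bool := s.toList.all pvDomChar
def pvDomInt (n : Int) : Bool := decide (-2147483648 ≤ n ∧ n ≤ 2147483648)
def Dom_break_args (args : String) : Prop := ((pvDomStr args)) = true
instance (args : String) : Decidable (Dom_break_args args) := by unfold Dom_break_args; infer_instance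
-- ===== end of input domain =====

-- B replaces A's three pop-driven helper loops over a reversed stack by one forward
-- state-machine pass (between/unquoted/quoted) with a list-buffer token accumulator, avoiding per-character string concatenation (objective: faster, measured).

-- ===== PORT A =====
-- A pops from the end of the reversed string, i.e. it consumes args front-to-back;
-- the stack is ported as the list of remaining characters with the top at the head.
def pvWs : List Char := [' ', '\t', '\n']
def pvQuotes : List Char := ['"', '\'']

-- remove_whitespace: pop while the top is whitespace
def pvRemoveWs : List Char → List Char
  | [] => []
  | c :: r => if c ∈ pvWs then pvRemoveWs r else c :: r

-- eat_until: accumulate chars until one in `t` (which is then popped too); returns (string, stack)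
def pvEatUntil (acc : List Char) (t : List Char) : List Char → List Char × List Char
  | [] => (acc, [])
  | c :: r => if c ∈ t then (acc, r) else pvEatUntil (acc ++ [c]) t r

theorem pvEatUntil_len (l : List Char) : ∀ acc t, (pvEatUntil acc t l).2.length ≤ l.length := by
  induction l with
  | nil => intro acc t; simp [pvEatUntil]
  | cons c r ih =>
    intro acc t
    simp only [pvEatUntil]
    split
    · simp
    · exact Nat.le_trans (ih _ _) (Nat.le_succ _)

theorem pvEatUntil_len_cons (c : Char) (r : List Char) (acc t : List Char) :
    (pvEatUntil acc t (c :: r)).2.length ≤ r.length := by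
  simp only [pvEatUntil]
  split
  · simp
  · exact pvEatUntil_len r _ t

theorem pvRemoveWs_len (l : List Char) : (pvRemoveWs l).length ≤ l.length := by
  induction l with
  | nil => simp [pvRemoveWs]
  | cons c r ih =>
    simp only [pvRemoveWs]
    split
    · exact Nat.le_trans ih (Nat.le_succ _)
    · simp

-- the main while loop of break_args (stack is whitespace-stripped between iterations)
def pvMainA : List Char → List String
  | [] => []
  | c :: rest =>
    if c ∈ pvQuotes then
      let p := pvEatUntil [] [c] rest
      String.mk p.1 :: pvMainA (pvRemoveWs p.2)
    else
      let p := pvEatUntil [] pvWs (c :: rest)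
      String.mk p.1 :: pvMainA (pvRemoveWs p.2)
termination_by l => l.length
decreasing_by
  · exact Nat.lt_succ_of_le (Nat.le_trans (pvRemoveWs_len _) (pvEatUntil_len _ _ _))
  · exact Nat.lt_succ_of_le (Nat.le_trans (pvRemoveWs_len _) (pvEatUntil_len_cons _ _ _ _))

def break_args (args : String) : List String := pvMainA (pvRemoveWs args.toList)

-- ===== PORT B =====
-- state: (result, mode, buf, quote); mode 0 = between tokens, 1 = unquoted, 2 = quoted
def pvStepB (st : List String × Nat × List Char × Char) (c : Char) :
    List String × Nat × List Char × Char :=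
  let (res, mode, buf, q) := st
  if mode = 0 then
    if c ∈ pvWs then st
    else if c ∈ pvQuotes then (res, 2, [], c)
    else (res, 1, [c], q)
  else if mode = 1 then
    if c ∈ pvWs then (res ++ [String.mk buf], 0, [], q)
    else (res, 1, buf ++ [c], q)
  else
    if c = q then (res ++ [String.mk buf], 0, [], q)
    else (res, 2, buf ++ [c], q)

-- the trailing `if state != 0: result.append(''.join(buf))`
def pvFinishB (st : List String × Nat × List Char × Char) : List String :=
  if st.2.1 ≠ 0 then st.1 ++ [String.mk st.2.2.1] else st.1

def break_args_alt (args : String) : List String :=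
  pvFinishB (args.toList.foldl pvStepB ([], 0, [], ' '))

-- ===== PRECONDITION & SPEC =====
def Spec_break_args (args : String) (out : List String) : Prop := out = break_args_alt args
instance (args : String) (out : List String) : Decidable (Spec_break_args args out) := by unfold Spec_break_args; infer_instance

-- ===== CLAIM (what is proved, stated in full; the proofs are below) =====
def Claim_equal_break_args : Prop := ∀ (args : String), Dom_break_args args → Spec_break_args args (break_args args)

-- ===== LEMMAS AND PROOFS =====

-- the three loop invariants of B's state machine, tied to A's helpers
theorem pvKey : ∀ (n : Nat) (l : List Char), l.length ≤ n →
    ((∀ res q, pvFinishB (l.foldl pvStepB (res, 0, [], q)) = res ++ pvMainA (pvRemoveWs l))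
    ∧ (∀ res acc q, pvFinishB (l.foldl pvStepB (res, 2, acc, q)) =
        res ++ String.mk (pvEatUntil acc [q] l).1 :: pvMainA (pvRemoveWs (pvEatUntil acc [q] l).2))
    ∧ (∀ res acc q, pvFinishB (l.foldl pvStepB (res, 1, acc, q)) =
        res ++ String.mk (pvEatUntil acc pvWs l).1 :: pvMainA (pvRemoveWs (pvEatUntil acc pvWs l).2))) := by
  intro n
  induction n with
  | zero =>
    intro l hl
    have : l = [] := List.eq_nil_of_length_eq_zero (Nat.le_zero.mp hl)
    subst this
    refine ⟨?_, ?_, ?_⟩ <;> intros <;>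
      simp [pvFinishB, pvEatUntil, pvRemoveWs, pvMainA, List.foldl]
  | succ n ih =>
    intro l hl
    cases l with
    | nil =>
      refine ⟨?_, ?_, ?_⟩ <;> intros <;>
        simp [pvFinishB, pvEatUntil, pvRemoveWs, pvMainA, List.foldl]
    | cons c r =>
      have hr : r.length ≤ n := by simpa using Nat.lt_succ_iff.mp (Nat.lt_of_lt_of_le (by simp) hl)
      obtain ⟨ih0, ih2, ih1⟩ := ih r hr
      refine ⟨?_, ?_, ?_⟩
      · -- mode 0
        intro res q
        by_cases hws : c ∈ pvWs
        · rw [List.foldl_cons]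
          simp only [pvStepB]
          norm_num [hws]
          rw [ih0 res q]
          have : pvRemoveWs (c :: r) = pvRemoveWs r := by simp [pvRemoveWs, hws]
          rw [this]
        · by_cases hq : c ∈ pvQuotes
          · rw [List.foldl_cons]
            simp only [pvStepB]
            norm_num [hws, hq]
            rw [ih2 res [] c]
            have : pvRemoveWs (c :: r) = c :: r := by simp [pvRemoveWs, hws]
            rw [this]
            simp [pvMainA, hq]
          · rw [List.foldl_cons]
            simp only [pvStepB]
            norm_num [hws, hq]
            rw [ih1 res [c] q]
            have h1 : pvRemoveWs (c :: r) = c :: r := by simp [pvRemoveWs, hws]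
            rw [h1]
            have h2 : pvEatUntil [] pvWs (c :: r) = pvEatUntil [c] pvWs r := by
              simp [pvEatUntil, hws]
            simp [pvMainA, hq, h2]
      · -- mode 2
        intro res acc q
        by_cases hc : c = q
        · subst hc
          rw [List.foldl_cons]
          simp only [pvStepB]
          norm_num
          rw [ih0 (res ++ [String.mk acc]) c]
          have : pvEatUntil acc [c] (c :: r) = (acc, r) := by simp [pvEatUntil]
          rw [this]
          simp
        · rw [List.foldl_cons]
          simp only [pvStepB]
          norm_num [hc]
          rw [ih2 res (acc ++ [c]) q]
          have : pvEatUntil acc [q] (c :: r) = pvEatUntil (acc ++ [c]) [q] r := by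
            simp [pvEatUntil, hc]
          rw [this]
      · -- mode 1
        intro res acc q
        by_cases hws : c ∈ pvWs
        · rw [List.foldl_cons]
          simp only [pvStepB]
          norm_num [hws]
          rw [ih0 (res ++ [String.mk acc]) q]
          have : pvEatUntil acc pvWs (c :: r) = (acc, r) := by simp [pvEatUntil, hws]
          rw [this]
          simp
        · rw [List.foldl_cons]
          simp only [pvStepB]
          norm_num [hws]
          rw [ih1 res (acc ++ [c]) q]
          have : pvEatUntil acc pvWs (c :: r) = pvEatUntil (acc ++ [c]) pvWs r := by
            simp [pvEatUntil, hws]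
          rw [this]

-- ===== VERDICT (by name: the statement is the Claim_ definition above) =====
theorem break_args_spec : Claim_equal_break_args := by
  intro args _
  unfold Spec_break_args break_args break_args_alt
  have h := (pvKey args.toList.length args.toList (Nat.le_refl _)).1 [] ' '
  rw [h]
  simp
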